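-- pv_equiv track=rewrite | github.com/MrBrantCode/unitest_baseline | mut_generate/mist_train_taco/taco_16072/solution.py | count_distinct_time_pairs
-- ===== SOURCE A (Python) =====
-- from itertools import permutations
--
-- def str_base(number, base):
--     if number < 0:
--         return '-' + str_base(-number, base)
--     (d, m) = divmod(number, base)
--     if d > 0:
--         return str_base(d, base) + str(m)
--     return str(m)
--
-- def count_distinct_time_pairs(n, m):
--     max_h = str_base(n - 1, 7)
--     max_m = str_base(m - 1, 7)
--     len_h = len(max_h)
--     len_m = len(max_m)
--     result = 0
--
--     for p in permutations(list(range(7)), len_h + len_m):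
--         if str(''.join(map(str, p[:len_h]))) <= max_h and str(''.join(map(str, p[len_h:]))) <= max_m:
--             result += 1
--
--     return result
-- ===== SOURCE B (Python) =====
-- from itertools import permutations, combinations
--
-- def str_base(number, base):
--     if number < 0:
--         return '-' + str_base(-number, base)
--     (d, m) = divmod(number, base)
--     if d > 0:
--         return str_base(d, base) + str(m)
--     return str(m)
--
-- def count_distinct_time_pairs(n, m):
--     max_h = str_base(n - 1, 7)
--     max_m = str_base(m - 1, 7)
--     len_h = len(max_h)
--     len_m = len(max_m)
--     total = 0
--     # group hour permutations by their digit set: for each len_h-subset S of the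
--     # seven digits, count valid hour orderings of S and, independently, valid
--     # minute permutations drawn from the complement of S; multiply and sum.
--     for S in combinations(range(7), len_h):
--         ch = 0
--         for h in permutations(S):
--             if ''.join(map(str, h)) <= max_h:
--                 ch += 1
--         comp = [d for d in range(7) if d not in S]
--         cm = 0
--         for mm in permutations(comp, len_m):
--             if ''.join(map(str, mm)) <= max_m:
--                 cm += 1
--         total += ch * cm
--     return total
-- ===== Notes on version B (the rewrite author's own statement) =====
-- stated objective: alternative
-- what changed: Replaces A's single filtered pass over all (len_h+len_m)-permutations by a combinatorial product: enumerate len_h-subsets of the seven digits, count valid hour orderings of each subset and valid minute permutations of its complement independently, and sum the products.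
import Mathlib
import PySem

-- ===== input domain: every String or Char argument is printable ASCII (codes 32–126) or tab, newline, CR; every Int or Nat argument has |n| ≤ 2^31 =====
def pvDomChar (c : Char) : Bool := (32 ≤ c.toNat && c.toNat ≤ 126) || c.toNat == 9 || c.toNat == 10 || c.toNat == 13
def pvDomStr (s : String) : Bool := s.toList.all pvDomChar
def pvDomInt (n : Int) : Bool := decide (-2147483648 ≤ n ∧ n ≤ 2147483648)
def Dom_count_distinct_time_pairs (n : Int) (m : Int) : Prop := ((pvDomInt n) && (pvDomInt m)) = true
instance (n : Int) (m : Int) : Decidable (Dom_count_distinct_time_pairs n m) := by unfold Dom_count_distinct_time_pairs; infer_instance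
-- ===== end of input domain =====

-- B replaces A's single filtered pass over all (len_h+len_m)-permutations by a combinatorial
-- product: enumerate len_h-subsets of the seven digits, count valid hour orderings of each
-- subset and valid minute permutations of its complement independently, and sum the products
-- (objective: alternative algorithm).


-- ===== PORT A =====
-- str_base, fuel-guarded (the fuel only makes the recursion structural; |number| + 2 is always
-- sufficient for the calls made below, where the base is 7)
def strBase (fuel : Nat) (number : Int) (base : Int) : String :=
  match fuel with
  | 0 => ""
  | f + 1 =>
    if number < 0 then "-" ++ strBase f (-number) base
    else
      let d := PySem.Int.floordiv number base
      let m := PySem.Int.mod number base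
      if d > 0 then strBase f d base ++ PySem.Int.toStr m
      else PySem.Int.toStr m

def count_distinct_time_pairs (n : Int) (m : Int) : Int :=
  let max_h := strBase ((n - 1).natAbs + 2) (n - 1) 7
  let max_m := strBase ((m - 1).natAbs + 2) (m - 1) 7
  let len_h := PySem.Str.len max_h
  let len_m := PySem.Str.len max_m
  (PySem.List.permutations (PySem.List.pyRange 0 7 1) (len_h + len_m).toNat).foldl
    (fun result p =>
      if (decide (PySem.Str.join "" ((PySem.List.slice p none (some len_h)).map PySem.Int.toStr) ≤ max_h) &&
          decide (PySem.Str.join "" ((PySem.List.slice p (some len_h) none).map PySem.Int.toStr) ≤ max_m))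
      then result + 1 else result) 0

-- ===== PORT B =====
def count_distinct_time_pairs_alt (n : Int) (m : Int) : Int :=
  let max_h := strBase ((n - 1).natAbs + 2) (n - 1) 7
  let max_m := strBase ((m - 1).natAbs + 2) (m - 1) 7
  let len_h := PySem.Str.len max_h
  let len_m := PySem.Str.len max_m
  (PySem.List.combinations (PySem.List.pyRange 0 7 1) len_h.toNat).foldl
    (fun total S =>
      let ch := (PySem.List.permutations S S.length).foldl
        (fun c h => if decide (PySem.Str.join "" (h.map PySem.Int.toStr) ≤ max_h) then c + 1 else c) (0 : Int)
      let comp := (PySem.List.pyRange 0 7 1).filter (fun d => !S.contains d)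
      let cm := (PySem.List.permutations comp len_m.toNat).foldl
        (fun c mm => if decide (PySem.Str.join "" (mm.map PySem.Int.toStr) ≤ max_m) then c + 1 else c) (0 : Int)
      total + ch * cm) 0

-- ===== PRECONDITION & SPEC =====
def Spec_count_distinct_time_pairs (n : Int) (m : Int) (out : Int) : Prop := out = count_distinct_time_pairs_alt n m
instance (n : Int) (m : Int) (out : Int) : Decidable (Spec_count_distinct_time_pairs n m out) := by unfold Spec_count_distinct_time_pairs; infer_instance

-- ===== CLAIM (what is proved, stated in full; the proofs are below) =====
def Claim_equal_count_distinct_time_pairs : Prop := ∀ (n : Int) (m : Int), Dom_count_distinct_time_pairs n m → Spec_count_distinct_time_pairs n m (count_distinct_time_pairs n m)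

-- ===== LEMMAS AND PROOFS =====

-- every member of permutations xs r has length r
lemma length_of_mem_perms {α : Type} {xs p : List α} {r : Nat}
    (h : p ∈ PySem.List.permutations xs r) : p.length = r := by
  induction r generalizing xs p with
  | zero => simp [PySem.List.permutations] at h; simp [h]
  | succ r ih =>
    simp only [PySem.List.permutations, List.mem_flatMap, List.mem_range] at h
    obtain ⟨i, hi, hp⟩ := h
    cases hx : xs[i]? with
    | none => rw [hx] at hp; simp at hp
    | some x =>
      rw [hx] at hp
      simp only [List.mem_map] at hp
      obtain ⟨q, hq, rfl⟩ := hp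
      simp [ih hq]

-- membership in permutations of a duplicate-free pool: exactly the duplicate-free
-- length-r lists drawn from the pool
lemma mem_perms_iff (pool : List Int) (hnd : pool.Nodup) (r : Nat) (h : List Int) :
    h ∈ PySem.List.permutations pool r ↔ h.Nodup ∧ h.length = r ∧ ∀ x ∈ h, x ∈ pool := by
  induction r generalizing pool h with
  | zero =>
    simp only [PySem.List.permutations, List.mem_singleton]
    constructor
    · rintro rfl; simp
    · rintro ⟨_, hl, _⟩; exact List.eq_nil_of_length_eq_zero hl
  | succ r ih =>
    constructor
    · intro hm
      simp only [PySem.List.permutations, List.mem_flatMap, List.mem_range] at hm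
      obtain ⟨i, hi, hp⟩ := hm
      rw [List.getElem?_eq_getElem hi] at hp
      simp only [List.mem_map] at hp
      obtain ⟨t, ht, rfl⟩ := hp
      have hnd' : (pool.eraseIdx i).Nodup := List.Nodup.eraseIdx i hnd
      obtain ⟨tnd, tlen, tsub⟩ := (ih (pool.eraseIdx i) hnd' t).mp ht
      have hE : pool.eraseIdx i = pool.filter (fun d => d != pool[i]) := by
        rw [← List.Nodup.erase_getElem hnd i hi, List.Nodup.erase_eq_filter hnd]
      refine ⟨?_, by simp [tlen], ?_⟩
      · rw [List.nodup_cons]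
        refine ⟨fun hmem => ?_, tnd⟩
        have := tsub _ hmem
        rw [hE, List.mem_filter] at this
        simp at this
      · intro x hx
        rcases List.mem_cons.mp hx with rfl | hx'
        · exact List.getElem_mem hi
        · have := tsub _ hx'
          rw [hE, List.mem_filter] at this
          exact this.1
    · rintro ⟨hnd_h, hlen, hsub⟩
      cases h with
      | nil => simp at hlen
      | cons x t =>
        have hx : x ∈ pool := hsub x (by simp)
        obtain ⟨i, hi, hxi⟩ := List.mem_iff_getElem.mp hx
        simp only [PySem.List.permutations, List.mem_flatMap, List.mem_range]
        refine ⟨i, hi, ?_⟩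
        rw [List.getElem?_eq_getElem hi]
        simp only [List.mem_map]
        refine ⟨t, ?_, by rw [hxi]⟩
        have hnd' : (pool.eraseIdx i).Nodup := List.Nodup.eraseIdx i hnd
        have hE : pool.eraseIdx i = pool.filter (fun d => d != pool[i]) := by
          rw [← List.Nodup.erase_getElem hnd i hi, List.Nodup.erase_eq_filter hnd]
        obtain ⟨hxt, tnd⟩ := List.nodup_cons.mp hnd_h
        refine (ih (pool.eraseIdx i) hnd' t).mpr ⟨tnd, by simpa using hlen, ?_⟩
        intro y hy
        have hyp : y ∈ pool := hsub y (List.mem_cons_of_mem _ hy)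
        have hyx : y ≠ pool[i] := by
          rw [hxi]; rintro rfl; exact hxt hy
        rw [hE, List.mem_filter]
        exact ⟨hyp, by simpa using hyx⟩

-- the permutation list of a duplicate-free pool has no duplicates
lemma nodup_perms (pool : List Int) (hnd : pool.Nodup) (r : Nat) :
    (PySem.List.permutations pool r).Nodup := by
  induction r generalizing pool with
  | zero => simp [PySem.List.permutations]
  | succ r ih =>
    simp only [PySem.List.permutations]
    rw [List.nodup_flatMap]
    constructor
    · intro i hi
      rw [List.mem_range] at hi
      rw [List.getElem?_eq_getElem hi]
      exact (ih (pool.eraseIdx i) (List.Nodup.eraseIdx i hnd)).map (fun a b hab => by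
        simpa using hab)
    · rw [List.pairwise_iff_getElem]
      intro i j hi hj hij
      simp only [List.length_range] at hi hj
      simp only [Function.onFun, List.getElem_range]
      rw [List.getElem?_eq_getElem hi, List.getElem?_eq_getElem hj]
      intro l hl1 hl2
      simp only [List.mem_map] at hl1 hl2
      obtain ⟨t1, _, rfl⟩ := hl1
      obtain ⟨t2, _, heq⟩ := hl2
      have : pool[j] = pool[i] := by
        have := congrArg (fun l => l.head?) heq
        simpa using this
      exact absurd ((List.Nodup.getElem_inj_iff hnd).mp this) (by omega)

-- the combination list of a duplicate-free pool has no duplicates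
lemma nodup_combinations (pool : List Int) (hnd : pool.Nodup) (r : Nat) :
    (PySem.List.combinations pool r).Nodup := by
  induction pool generalizing r with
  | nil => cases r <;> simp [PySem.List.combinations_zero, PySem.List.combinations_nil_succ]
  | cons x t ih =>
    obtain ⟨hxt, tnd⟩ := List.nodup_cons.mp hnd
    cases r with
    | zero => simp [PySem.List.combinations_zero]
    | succ r =>
      rw [PySem.List.combinations_cons_succ]
      refine List.Nodup.append ((ih tnd r).map (fun a b hab => by simpa using hab)) (ih tnd (r + 1)) ?_
      intro c hc1 hc2
      simp only [List.mem_map] at hc1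
      obtain ⟨c', _, rfl⟩ := hc1
      have := PySem.List.sublist_of_mem_combinations hc2
      exact hxt (this.mem (by simp))

-- grouping: the r-permutations of a duplicate-free pool are, up to order, the full
-- permutations of each r-combination of the pool
lemma perms_eq_groups (pool : List Int) (hnd : pool.Nodup) (r : Nat) :
    (PySem.List.permutations pool r).Perm
      ((PySem.List.combinations pool r).flatMap (fun S => PySem.List.permutations S S.length)) := by
  have rhsnodup : ((PySem.List.combinations pool r).flatMap
      (fun S => PySem.List.permutations S S.length)).Nodup := by
    rw [List.nodup_flatMap]
    constructor
    · intro S hS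
      exact nodup_perms S ((PySem.List.sublist_of_mem_combinations hS).nodup hnd) S.length
    · refine List.Nodup.pairwise_of_forall_ne (nodup_combinations pool hnd r) ?_
      intro S1 hS1 S2 hS2 hne l hl1 hl2
      have p1 := PySem.List.perm_of_mem_permutations hl1
      have p2 := PySem.List.perm_of_mem_permutations hl2
      exact hne ((List.Nodup.perm_iff_eq_of_sublist hnd
        (PySem.List.sublist_of_mem_combinations hS1)
        (PySem.List.sublist_of_mem_combinations hS2)).mp (p1.symm.trans p2))
  refine (List.perm_ext_iff_of_nodup (nodup_perms pool hnd r) rhsnodup).mpr ?_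
  intro h
  rw [mem_perms_iff pool hnd r h, List.mem_flatMap]
  constructor
  · rintro ⟨hh, hlen, hsub⟩
    refine ⟨pool.filter (fun x => h.contains x), ?_, ?_⟩
    · rw [PySem.List.mem_combinations_iff]
      refine ⟨List.filter_sublist, ?_⟩
      have hfnd : (pool.filter (fun x => h.contains x)).Nodup := List.filter_sublist.nodup hnd
      have hmemiff : ∀ a, a ∈ pool.filter (fun x => h.contains x) ↔ a ∈ h := by
        intro a
        rw [List.mem_filter]
        constructor
        · intro ⟨_, hc⟩; simpa using hc
        · intro ha; exact ⟨hsub a ha, by simpa using ha⟩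
      have hperm : (pool.filter (fun x => h.contains x)).Perm h :=
        (List.perm_ext_iff_of_nodup hfnd hh).mpr hmemiff
      rw [hperm.length_eq, hlen]
    · have hfnd : (pool.filter (fun x => h.contains x)).Nodup := List.filter_sublist.nodup hnd
      rw [mem_perms_iff _ hfnd _ h]
      have hmemiff : ∀ a, a ∈ pool.filter (fun x => h.contains x) ↔ a ∈ h := by
        intro a
        rw [List.mem_filter]
        constructor
        · intro ⟨_, hc⟩; simpa using hc
        · intro ha; exact ⟨hsub a ha, by simpa using ha⟩
      have hperm : (pool.filter (fun x => h.contains x)).Perm h :=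
        (List.perm_ext_iff_of_nodup hfnd hh).mpr hmemiff
      exact ⟨hh, hperm.length_eq.symm, fun x hx => (hmemiff x).mpr hx⟩
  · rintro ⟨S, hS, hmem⟩
    rw [PySem.List.mem_combinations_iff] at hS
    have hSnd : S.Nodup := hS.1.nodup hnd
    have hperm : h.Perm S := PySem.List.perm_of_mem_permutations hmem
    exact ⟨hperm.symm.nodup hSnd, by rw [hperm.length_eq, hS.2],
      fun x hx => hS.1.mem (hperm.mem_iff.mp hx)⟩

-- splitting the combined permutations (A's single pass): an (a+b)-permutation is an
-- a-permutation followed by a b-permutation of the remaining elements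
lemma perms_split (pool : List Int) (hnd : pool.Nodup) (a b : Nat) :
    PySem.List.permutations pool (a + b) =
      (PySem.List.permutations pool a).flatMap
        (fun h => (PySem.List.permutations (pool.filter (fun d => !h.contains d)) b).map (h ++ ·)) := by
  induction a generalizing pool with
  | zero =>
    simp [PySem.List.permutations]
  | succ a ih =>
    have hab : a + 1 + b = (a + b) + 1 := by omega
    rw [hab]
    simp only [PySem.List.permutations, List.flatMap_assoc]
    apply List.flatMap_congr
    intro i hi
    simp only [List.mem_range] at hi
    rw [List.getElem?_eq_getElem hi]
    simp only
    have hE : pool.eraseIdx i = pool.filter (fun d => d != pool[i]) := by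
      rw [← List.Nodup.erase_getElem hnd i hi, List.Nodup.erase_eq_filter hnd]
    rw [ih (pool.eraseIdx i) (List.Nodup.eraseIdx i hnd)]
    rw [List.map_flatMap, List.flatMap_map]
    apply List.flatMap_congr
    intro h hh
    rw [List.map_map]
    have hfilt : (pool.eraseIdx i).filter (fun d => !h.contains d)
        = pool.filter (fun d => !((pool[i] :: h).contains d)) := by
      rw [hE, List.filter_filter]
      apply List.filter_congr
      intro d _
      by_cases hdx : d = pool[i] <;> simp [hdx, Bool.and_comm]
    rw [hfilt]
    rfl

-- A's filtered count over combined permutations as a sum over hour permutations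
lemma count_split (pool : List Int) (hnd : pool.Nodup) (a b : Nat) (p q : List Int → Bool) :
    ((PySem.List.permutations pool (a + b)).countP (fun x => p (x.take a) && q (x.drop a)) : Int) =
      ((PySem.List.permutations pool a).map (fun h =>
        if p h then ((PySem.List.permutations (pool.filter (fun d => !h.contains d)) b).countP q : Int)
        else 0)).sum := by
  rw [perms_split pool hnd a b, List.countP_flatMap, Nat.cast_list_sum, List.map_map]
  refine congrArg (List.sum (α := Int)) (List.map_congr_left ?_)
  intro h hh
  have hlen : h.length = a := length_of_mem_perms hh
  simp only [Function.comp, List.countP_map]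
  have hcp : List.countP ((fun x => p (x.take a) && q (x.drop a)) ∘ (fun t => h ++ t))
      (PySem.List.permutations (pool.filter (fun d => !h.contains d)) b)
      = List.countP (fun t => p h && q t)
        (PySem.List.permutations (pool.filter (fun d => !h.contains d)) b) := by
    apply List.countP_congr
    intro t ht
    simp [Function.comp, ← hlen]
  rw [hcp]
  by_cases hp : p h <;> simp [hp]

-- a sum of if-then-c-else-0 over a list is (count) * c
lemma sum_map_if_const (l : List (List Int)) (p : List Int → Bool) (c : Int) :
    (l.map (fun x => if p x then c else 0)).sum = (l.countP p : Int) * c := by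
  induction l with
  | nil => simp
  | cons x t ih =>
    by_cases hp : p x
    · simp [hp, ih]; ring
    · simp [hp, ih]

-- sum distributes over flatMap
lemma sum_flatMap_int {α : Type} (l : List α) (f : α → List Int) :
    (l.flatMap f).sum = (l.map (fun a => (f a).sum)).sum := by
  induction l with
  | nil => simp
  | cons x t ih => simp [List.flatMap_cons, ih]

-- ===== VERDICT (by name: the statement is the Claim_ definition above) =====
theorem count_distinct_time_pairs_spec : Claim_equal_count_distinct_time_pairs := by
  intro n m _
  unfold Spec_count_distinct_time_pairs count_distinct_time_pairs count_distinct_time_pairs_alt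
  simp only []
  set maxh := strBase ((n - 1).natAbs + 2) (n - 1) 7 with hmaxh
  set maxm := strBase ((m - 1).natAbs + 2) (m - 1) 7 with hmaxm
  set lh := PySem.Str.len maxh with hlh
  set lm := PySem.Str.len maxm with hlm
  set pool := PySem.List.pyRange 0 7 1 with hpool
  have hnd : pool.Nodup := PySem.List.nodup_pyRange_one 0 7
  set p : List Int → Bool := fun h => decide (PySem.Str.join "" (h.map PySem.Int.toStr) ≤ maxh) with hp
  set q : List Int → Bool := fun h => decide (PySem.Str.join "" (h.map PySem.Int.toStr) ≤ maxm) with hq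
  have h0h : 0 ≤ lh := by simp [hlh, PySem.Str.len_eq]
  have h0m : 0 ≤ lm := by simp [hlm, PySem.Str.len_eq]
  have htn : (lh + lm).toNat = lh.toNat + lm.toNat := by omega
  rw [htn]
  -- A's loop: a filtered count over the combined permutations
  have hbody : (fun (result : Int) (x : List Int) =>
      if (decide (PySem.Str.join "" ((PySem.List.slice x none (some lh)).map PySem.Int.toStr) ≤ maxh) &&
          decide (PySem.Str.join "" ((PySem.List.slice x (some lh) none).map PySem.Int.toStr) ≤ maxm))
      then result + 1 else result) =
      (fun (r : Int) (x : List Int) =>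
        if (fun x => p (x.take lh.toNat) && q (x.drop lh.toNat)) x then r + 1 else r) := by
    funext r x
    rw [PySem.List.slice_to x h0h, PySem.List.slice_from x h0h]
  rw [hbody, PySem.List.foldl_if_add_one, count_split pool hnd lh.toNat lm.toNat p q]
  -- group the hour permutations by their digit set
  have hG := ((perms_eq_groups pool hnd lh.toNat).map (fun h =>
    if p h then ((PySem.List.permutations (pool.filter (fun d => !h.contains d)) lm.toNat).countP q : Int)
    else 0)).sum_eq
  rw [hG, List.map_flatMap, sum_flatMap_int]
  -- B's loop: a sum of products over the combinations
  have hbodyB : (fun (total : Int) (S : List Int) =>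
      let ch := (PySem.List.permutations S S.length).foldl
        (fun c h => if decide (PySem.Str.join "" (h.map PySem.Int.toStr) ≤ maxh) then c + 1 else c) (0 : Int)
      let comp := pool.filter (fun d => !S.contains d)
      let cm := (PySem.List.permutations comp lm.toNat).foldl
        (fun c mm => if decide (PySem.Str.join "" (mm.map PySem.Int.toStr) ≤ maxm) then c + 1 else c) (0 : Int)
      total + ch * cm)
      = (fun (total : Int) (S : List Int) => total +
        ((PySem.List.permutations S S.length).foldl (fun c h => if p h then c + 1 else c) (0 : Int)) *
        ((PySem.List.permutations (pool.filter (fun d => !S.contains d)) lm.toNat).foldl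
          (fun c mm => if q mm then c + 1 else c) (0 : Int))) := by
    funext total S; rfl
  rw [hbodyB, PySem.List.foldl_add]
  simp only [zero_add]
  refine congrArg (List.sum (α := Int)) (List.map_congr_left ?_)
  intro S hS
  -- inside one group the remaining pool is determined by the combination
  have hgroup : ∀ h ∈ PySem.List.permutations S S.length,
      (if p h then ((PySem.List.permutations (pool.filter (fun d => !h.contains d)) lm.toNat).countP q : Int) else 0)
      = (if p h then ((PySem.List.permutations (pool.filter (fun d => !S.contains d)) lm.toNat).countP q : Int) else 0) := by
    intro h hh
    have hperm : h.Perm S := PySem.List.perm_of_mem_permutations hh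
    have : pool.filter (fun d => !h.contains d) = pool.filter (fun d => !S.contains d) := by
      apply List.filter_congr
      intro d _
      simp [hperm.mem_iff]
    rw [this]
  rw [List.map_congr_left hgroup, sum_map_if_const]
  rw [PySem.List.foldl_if_add_one, PySem.List.foldl_if_add_one]
  ring
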